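-- pv_equiv track=rewrite | github.com/jdb19937/proplasma | matrix.py | lcps
-- ===== SOURCE A (Python) =====
-- def lcps(strs):
--     """Longest common prefix, trimmed back to a sentence boundary so we
--     never split mid-sentence — important when the common preamble is
--     shown once and per-cell tails are shown after it."""
--     if not strs:
--         return ''
--     prefix = strs[0]
--     for s in strs[1:]:
--         n = min(len(prefix), len(s))
--         i = 0
--         while i < n and prefix[i] == s[i]:
--             i += 1
--         prefix = prefix[:i]
--         if not prefix:
--             return ''
--     j = max(prefix.rfind('. '), prefix.rfind('! '),
--             prefix.rfind('? '), prefix.rfind('.\n'),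
--             prefix.rfind('!\n'), prefix.rfind('?\n'))
--     if j < 0:
--         return ''
--     return prefix[:j + 2]
-- ===== SOURCE B (Python) =====
-- def lcps(strs):
--     """Sort-based LCP: the common prefix of all strings equals the common
--     prefix of the lexicographic min and max, so sort once and compare only
--     the two extremes; then trim to a sentence boundary as before."""
--     if not strs:
--         return ''
--     ss = sorted(strs)
--     lo, hi = ss[0], ss[-1]
--     out = []
--     for a, b in zip(lo, hi):
--         if a != b:
--             break
--         out.append(a)
--     prefix = ''.join(out)
--     j = max(prefix.rfind('. '), prefix.rfind('! '),
--             prefix.rfind('? '), prefix.rfind('.\n'),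
--             prefix.rfind('!\n'), prefix.rfind('?\n'))
--     if j < 0:
--         return ''
--     return prefix[:j + 2]
-- ===== Notes on version B (the rewrite author's own statement) =====
-- stated objective: alternative
-- what changed: Replaces the pairwise shrinking fold over all strings by sorting the list once and computing the common prefix of only the lexicographic min and max; the sentence-boundary trim is unchanged.
import Mathlib
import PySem

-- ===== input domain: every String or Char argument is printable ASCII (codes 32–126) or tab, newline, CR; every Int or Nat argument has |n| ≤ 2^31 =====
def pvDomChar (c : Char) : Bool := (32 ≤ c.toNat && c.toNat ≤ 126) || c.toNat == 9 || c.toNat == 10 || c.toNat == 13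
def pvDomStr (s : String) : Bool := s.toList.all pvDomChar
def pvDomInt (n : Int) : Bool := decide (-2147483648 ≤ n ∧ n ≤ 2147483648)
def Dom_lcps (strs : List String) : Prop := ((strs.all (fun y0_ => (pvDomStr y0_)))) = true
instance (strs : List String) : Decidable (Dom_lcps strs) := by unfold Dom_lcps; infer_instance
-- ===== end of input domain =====

-- B replaces A's fold of pairwise common prefixes over every string by one sort
-- followed by a single prefix comparison of the two lexicographic extremes
-- (alternative algorithm); the sentence-boundary trim block is shared verbatim.

-- ===== PORT A =====
-- the trim-to-sentence-boundary block (textually identical in A and B)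
def trimSB (p : String) : String :=
  let j := max (PySem.Str.rfind p ". ") (max (PySem.Str.rfind p "! ")
    (max (PySem.Str.rfind p "? ") (max (PySem.Str.rfind p ".\n")
    (max (PySem.Str.rfind p "!\n") (PySem.Str.rfind p "?\n")))))
  if j < 0 then "" else PySem.Str.slice p none (some (j + 2))

-- A's inner while loop: the count i of leading positions where the two strings agree
def lcpLen : List Char → List Char → Nat
  | a :: as, b :: bs => if a = b then lcpLen as bs + 1 else 0
  | _, _ => 0

-- A's for-loop over strs[1:], with the early '' return when the prefix empties
def lcpsGo : List Char → List String → String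
  | p, [] => trimSB (String.ofList p)
  | p, s :: r =>
    let q := p.take (lcpLen p s.toList)
    if q = [] then "" else lcpsGo q r

def lcps (strs : List String) : String :=
  match strs with
  | [] => ""
  | p0 :: rest => lcpsGo p0.toList rest

-- ===== PORT B =====
-- B's zip loop: build the common prefix of the two extremes char by char
def lcpZip : List Char → List Char → List Char
  | a :: as, b :: bs => if a = b then a :: lcpZip as bs else []
  | _, _ => []

def lcps_alt (strs : List String) : String :=
  match strs with
  | [] => ""
  | _ :: _ =>
    let ss := PySem.List.sorted strs (fun x => x) false
    let lo := ss.headD ""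
    let hi := ss.getLastD ""
    trimSB (String.ofList (lcpZip lo.toList hi.toList))

-- ===== PRECONDITION & SPEC =====
def Spec_lcps (strs : List String) (out : String) : Prop := out = lcps_alt strs
instance (strs : List String) (out : String) : Decidable (Spec_lcps strs out) := by unfold Spec_lcps; infer_instance

-- ===== CLAIM (what is proved, stated in full; the proofs are below) =====
def Claim_equal_lcps : Prop := ∀ (strs : List String), Dom_lcps strs → Spec_lcps strs (lcps strs)

-- ===== LEMMAS AND PROOFS =====

theorem lcpZip_nil_left (s : List Char) : lcpZip [] s = [] := by cases s <;> rfl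
theorem lcpZip_nil_right (a : List Char) : lcpZip a [] = [] := by cases a <;> rfl
theorem lcpZip_cons_pos (x : Char) (as bs : List Char) :
    lcpZip (x :: as) (x :: bs) = x :: lcpZip as bs := by simp [lcpZip]
theorem lcpZip_cons_neg {x y : Char} (h : x ≠ y) (as bs : List Char) :
    lcpZip (x :: as) (y :: bs) = [] := by simp [lcpZip, h]

theorem prefix_lcpZip_iff : ∀ (a b p : List Char), p <+: lcpZip a b ↔ p <+: a ∧ p <+: b := by
  intro a
  induction a with
  | nil =>
    intro b p
    rw [lcpZip_nil_left]
    constructor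
    · intro h
      have hp : p = [] := List.prefix_nil.mp h
      subst hp
      exact ⟨List.nil_prefix, List.nil_prefix⟩
    · exact fun h => h.1
  | cons x as ih =>
    intro b p
    cases b with
    | nil =>
      rw [lcpZip_nil_right]
      constructor
      · intro h
        have hp : p = [] := List.prefix_nil.mp h
        subst hp
        exact ⟨List.nil_prefix, List.nil_prefix⟩
      · exact fun h => h.2
    | cons y bs =>
      by_cases hxy : x = y
      · subst hxy
        rw [lcpZip_cons_pos]
        cases p with
        | nil => simp
        | cons q ps =>
          simp only [List.cons_prefix_cons, ih]
          tauto
      · rw [lcpZip_cons_neg hxy]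
        constructor
        · intro h
          have hp : p = [] := List.prefix_nil.mp h
          subst hp
          exact ⟨List.nil_prefix, List.nil_prefix⟩
        · rintro ⟨h1, h2⟩
          cases p with
          | nil => exact List.nil_prefix
          | cons q ps =>
            rw [List.cons_prefix_cons] at h1 h2
            exact absurd (h1.1.symm.trans h2.1) hxy

theorem lcpZip_prefix_left (a b : List Char) : lcpZip a b <+: a :=
  ((prefix_lcpZip_iff a b _).1 (List.prefix_refl _)).1
theorem lcpZip_prefix_right (a b : List Char) : lcpZip a b <+: b :=
  ((prefix_lcpZip_iff a b _).1 (List.prefix_refl _)).2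

theorem prefix_antisymm {a b : List Char} (h1 : a <+: b) (h2 : b <+: a) : a = b :=
  h1.eq_of_length (Nat.le_antisymm h1.length_le h2.length_le)

theorem lcpZip_self (a : List Char) : lcpZip a a = a :=
  prefix_antisymm (lcpZip_prefix_left a a)
    ((prefix_lcpZip_iff a a a).2 ⟨List.prefix_refl _, List.prefix_refl _⟩)

theorem lcpZip_assoc (a b c : List Char) : lcpZip (lcpZip a b) c = lcpZip a (lcpZip b c) := by
  have L := (prefix_lcpZip_iff (lcpZip a b) c _).1 (List.prefix_refl _)
  have L2 := (prefix_lcpZip_iff a b _).1 L.1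
  have R := (prefix_lcpZip_iff a (lcpZip b c) _).1 (List.prefix_refl _)
  have R2 := (prefix_lcpZip_iff b c _).1 R.2
  exact prefix_antisymm
    ((prefix_lcpZip_iff _ _ _).2 ⟨L2.1, (prefix_lcpZip_iff _ _ _).2 ⟨L2.2, L.2⟩⟩)
    ((prefix_lcpZip_iff _ _ _).2 ⟨(prefix_lcpZip_iff _ _ _).2 ⟨R.1, R2.1⟩, R2.2⟩)

-- a common prefix of the two lexicographic endpoints is a prefix of anything between them
theorem prefix_between : ∀ (p a b c : List Char), p <+: a → p <+: c → a ≤ b → b ≤ c → p <+: b := by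
  intro p
  induction p with
  | nil => intros; exact List.nil_prefix
  | cons q ps ih =>
    intro a b c hpa hpc hab hbc
    obtain ⟨a', rfl⟩ := hpa
    obtain ⟨c', rfl⟩ := hpc
    cases b with
    | nil =>
      rw [← not_lt] at hab
      exact absurd (List.nil_lt_cons _ _) hab
    | cons r bs =>
      rw [List.cons_append] at hab hbc
      rw [← not_lt, List.cons_lt_cons_iff] at hab hbc
      push Not at hab hbc
      obtain ⟨h1, h2⟩ := hab
      obtain ⟨h3, h4⟩ := hbc
      have hqr : q = r := le_antisymm h1 h3
      subst hqr
      have hA : ps ++ a' ≤ bs := h2 rfl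
      have hB : bs ≤ ps ++ c' := h4 rfl
      rw [List.cons_prefix_cons]
      exact ⟨rfl, ih (ps ++ a') bs (ps ++ c') (List.prefix_append _ _) (List.prefix_append _ _) hA hB⟩

theorem lcpZip_absorb (x y m : List Char) (h : lcpZip x m <+: y) :
    lcpZip x (lcpZip y m) = lcpZip x m := by
  have L := (prefix_lcpZip_iff x (lcpZip y m) _).1 (List.prefix_refl _)
  have L2 := (prefix_lcpZip_iff y m _).1 L.2
  have R := (prefix_lcpZip_iff x m _).1 (List.prefix_refl _)
  exact prefix_antisymm
    ((prefix_lcpZip_iff _ _ _).2 ⟨L.1, L2.2⟩)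
    ((prefix_lcpZip_iff _ _ _).2 ⟨R.1, (prefix_lcpZip_iff _ _ _).2 ⟨h, R.2⟩⟩)

-- A's fold over the remaining strings
def lcpFold (t : List String) (a : List Char) : List Char :=
  t.foldl (fun acc s => lcpZip acc s.toList) a

theorem prefix_lcpFold_iff : ∀ (t : List String) (a p : List Char),
    p <+: lcpFold t a ↔ p <+: a ∧ ∀ s ∈ t, p <+: s.toList := by
  intro t
  induction t with
  | nil => intro a p; simp [lcpFold]
  | cons s r ih =>
    intro a p
    show p <+: lcpFold r (lcpZip a s.toList) ↔ _
    rw [ih, prefix_lcpZip_iff]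
    simp only [List.mem_cons]
    constructor
    · rintro ⟨⟨h1, h2⟩, h3⟩
      exact ⟨h1, fun x hx => by rcases hx with rfl | hx; exact h2; exact h3 x hx⟩
    · rintro ⟨h1, h2⟩
      exact ⟨⟨h1, h2 s (Or.inl rfl)⟩, fun x hx => h2 x (Or.inr hx)⟩

theorem lcpFold_prefix_of_mem (t : List String) (h s : String) (hs : s ∈ h :: t) :
    lcpFold t h.toList <+: s.toList := by
  have H := (prefix_lcpFold_iff t h.toList _).1 (List.prefix_refl _)
  rcases List.mem_cons.1 hs with rfl | hm
  · exact H.1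
  · exact H.2 s hm

theorem lcpFold_eq_of_perm (h1 h2 : String) (t1 t2 : List String)
    (hp : (h1 :: t1).Perm (h2 :: t2)) : lcpFold t1 h1.toList = lcpFold t2 h2.toList := by
  apply prefix_antisymm
  · rw [prefix_lcpFold_iff]
    exact ⟨lcpFold_prefix_of_mem t1 h1 h2 (hp.mem_iff.2 (List.mem_cons_self ..)),
      fun s hs => lcpFold_prefix_of_mem t1 h1 s (hp.mem_iff.2 (List.mem_cons_of_mem _ hs))⟩
  · rw [prefix_lcpFold_iff]
    exact ⟨lcpFold_prefix_of_mem t2 h2 h1 (hp.symm.mem_iff.2 (List.mem_cons_self ..)),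
      fun s hs => lcpFold_prefix_of_mem t2 h2 s (hp.symm.mem_iff.2 (List.mem_cons_of_mem _ hs))⟩

theorem lcpFold_zip : ∀ (t : List String) (a b : List Char),
    lcpFold t (lcpZip a b) = lcpZip a (lcpFold t b) := by
  intro t
  induction t with
  | nil => intro a b; rfl
  | cons s r ih =>
    intro a b
    show lcpFold r (lcpZip (lcpZip a b) s.toList) = lcpZip a (lcpFold r (lcpZip b s.toList))
    rw [lcpZip_assoc, ih]

theorem lcpFold_sorted_chain : ∀ (t : List String) (x : String) (hne : t ≠ []),
    (x :: t).Pairwise (fun a b : String => a ≤ b) →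
    lcpFold t x.toList = lcpZip x.toList ((t.getLast hne).toList) := by
  intro t
  induction t with
  | nil => intro x hne; cases hne rfl
  | cons y t' ih =>
    intro x hne hp
    have hp' := List.pairwise_cons.mp hp
    have hxy : x ≤ y := hp'.1 y (List.mem_cons_self ..)
    cases t' with
    | nil =>
      show lcpFold [] (lcpZip x.toList y.toList) = _
      rfl
    | cons z r =>
      have hty := List.pairwise_cons.mp hp'.2
      have hm : (z :: r).getLast (by simp) ∈ z :: r := List.getLast_mem _
      have hym : y ≤ (z :: r).getLast (by simp) := hty.1 _ hm
      have hstep : lcpFold (y :: z :: r) x.toList =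
          lcpZip x.toList (lcpFold (z :: r) y.toList) := by
        show lcpFold (z :: r) (lcpZip x.toList y.toList) = _
        exact lcpFold_zip (z :: r) x.toList y.toList
      rw [hstep, ih y (by simp) hp'.2]
      have hgl : (y :: z :: r).getLast hne = (z :: r).getLast (by simp) :=
        List.getLast_cons (by simp)
      rw [hgl]
      apply lcpZip_absorb
      exact prefix_between _ _ _ _ (lcpZip_prefix_left _ _) (lcpZip_prefix_right _ _)
        (String.le_iff_toList_le.mp hxy) (String.le_iff_toList_le.mp hym)

theorem take_lcpLen : ∀ (p s : List Char), p.take (lcpLen p s) = lcpZip p s := by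
  intro p
  induction p with
  | nil => intro s; cases s <;> rfl
  | cons x ps ih =>
    intro s
    cases s with
    | nil => rfl
    | cons y bs =>
      by_cases h : x = y
      · subst h
        rw [lcpZip_cons_pos]
        show (x :: ps).take (lcpLen (x :: ps) (x :: bs)) = _
        simp [lcpLen, ih]
      · rw [lcpZip_cons_neg h]
        show (x :: ps).take (lcpLen (x :: ps) (y :: bs)) = _
        simp [lcpLen, h]

theorem lcpFold_nil_acc : ∀ (t : List String), lcpFold t [] = [] := by
  intro t
  induction t with
  | nil => rfl
  | cons s r ih =>
    show lcpFold r (lcpZip [] s.toList) = []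
    rw [lcpZip_nil_left]; exact ih

theorem trim_nil : trimSB (String.ofList []) = "" := by decide

theorem goA_eq : ∀ (t : List String) (p : List Char),
    lcpsGo p t = trimSB (String.ofList (lcpFold t p)) := by
  intro t
  induction t with
  | nil => intro p; rfl
  | cons s r ih =>
    intro p
    show (let q := p.take (lcpLen p s.toList); if q = [] then "" else lcpsGo q r) = _
    simp only [take_lcpLen]
    by_cases h : lcpZip p s.toList = []
    · rw [if_pos h]
      show ("" : String) = trimSB (String.ofList (lcpFold r (lcpZip p s.toList)))
      rw [h, lcpFold_nil_acc, trim_nil]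
    · rw [if_neg h, ih]
      rfl

theorem getLastD_eq_getLast {α : Type} (l : List α) (d : α) (h : l ≠ []) :
    l.getLastD d = l.getLast h := by
  cases l with
  | nil => exact absurd rfl h
  | cons a t => simp [List.getLastD_eq_getLast?, List.getLast?_eq_some_getLast]

theorem lcps_main : ∀ (strs : List String), lcps strs = lcps_alt strs := by
  intro strs
  cases strs with
  | nil => rfl
  | cons h t =>
    have hss : PySem.List.sorted (h :: t) (fun x : String => x) false ≠ [] := by
      intro hE
      exact List.cons_ne_nil h t ((PySem.List.sorted_eq_nil_iff _ _ _).mp hE)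
    obtain ⟨h', t', hss_eq⟩ : ∃ h' t',
        PySem.List.sorted (h :: t) (fun x : String => x) false = h' :: t' := by
      cases hE : PySem.List.sorted (h :: t) (fun x : String => x) false with
      | nil => exact absurd hE hss
      | cons a b => exact ⟨a, b, rfl⟩
    have hperm : (h' :: t').Perm (h :: t) := hss_eq ▸ PySem.List.sorted_perm _ _ _
    have hpair : (h' :: t').Pairwise (fun a b : String => a ≤ b) := by
      have := PySem.List.sorted_pairwise (h :: t) (fun x : String => x)
      rw [hss_eq] at this
      exact this
    show lcpsGo h.toList t = lcps_alt (h :: t)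
    rw [goA_eq]
    simp only [lcps_alt, hss_eq]
    cases t' with
    | nil =>
      have e : h :: t = [h'] := List.perm_singleton.mp hperm.symm
      injection e with hh ht
      subst hh
      subst ht
      simp [lcpFold, lcpZip_self]
    | cons z r =>
      have hfold : lcpFold t h.toList = lcpFold (z :: r) h'.toList :=
        lcpFold_eq_of_perm h h' t (z :: r) hperm.symm
      rw [hfold, lcpFold_sorted_chain (z :: r) h' (by simp) hpair]
      have hLast : (h' :: z :: r).getLastD "" = (z :: r).getLast (by simp) := by
        rw [getLastD_eq_getLast _ _ (by simp)]
        exact List.getLast_cons (by simp)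
      rw [hLast]
      rfl

-- ===== VERDICT (by name: the statement is the Claim_ definition above) =====
theorem lcps_spec : Claim_equal_lcps := by
  intro strs _
  unfold Spec_lcps
  exact lcps_main strs
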